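-- pv_equiv track=rewrite | github.com/ckoons/BubbleSpacetimeTheory | play/toy_345_star_subdivision_scaling.py | subdivide_star
-- ===== SOURCE A (Python) =====
-- from collections import defaultdict
--
-- def subdivide_star(parity_checks, backbone):
--     """Star subdivision: each variable gets degree exactly 2.
--
--     For variable v in k checks (k > 2):
--     - Create k edge variables e_1,...,e_k
--     - Replace v in C_i with e_i
--     - Add ONE hub constraint: (e_1,...,e_k) with XOR = 0
--     - Each e_i in: C_i (1) + hub (1) = degree 2
--     """
--     var_checks = defaultdict(list)
--     for ci, check in enumerate(parity_checks):
--         for pos, v in enumerate(check):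
--             var_checks[v].append((ci, pos))
--
--     next_var_id = max(backbone.keys()) + 1 if backbone else 0
--     new_checks = list(parity_checks)
--     hub_constraints = []
--     hub_widths = []
--
--     for v, appearances in var_checks.items():
--         k = len(appearances)
--         if k <= 2:
--             continue
--         edge_vars = []
--         for i in range(k):
--             edge_vars.append(next_var_id)
--             next_var_id += 1
--         for idx, (ci, pos) in enumerate(appearances):
--             check = list(new_checks[ci])
--             check[pos] = edge_vars[idx]
--             new_checks[ci] = tuple(check)
--         hub_constraints.append(tuple(edge_vars))
--         hub_widths.append(k)
--
--     return new_checks, hub_constraints, next_var_id, hub_widths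
-- ===== SOURCE B (Python) =====
-- def subdivide_star(parity_checks, backbone):
--     """Star subdivision, single-pass rebuild: count variable degrees once,
--     allocate each high-degree variable a contiguous block of edge ids, then
--     rebuild every check in one left-to-right pass with running counters."""
--     count = {}
--     order = []  # variables in first-appearance order
--     for check in parity_checks:
--         for v in check:
--             if count.get(v, 0) == 0:
--                 order.append(v)
--             count[v] = count.get(v, 0) + 1
--
--     next_var_id = max(backbone.keys()) + 1 if backbone else 0
--
--     base = {}
--     hub_constraints = []
--     hub_widths = []
--     for v in order:
--         k = count[v]
--         if k > 2:
--             base[v] = next_var_id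
--             hub_constraints.append(tuple(range(next_var_id, next_var_id + k)))
--             hub_widths.append(k)
--             next_var_id += k
--
--     seen = {}
--     new_checks = []
--     for check in parity_checks:
--         row = []
--         touched = False
--         for v in check:
--             if count[v] > 2:
--                 row.append(base[v] + seen.get(v, 0))
--                 seen[v] = seen.get(v, 0) + 1
--                 touched = True
--             else:
--                 row.append(v)
--         new_checks.append(tuple(row) if touched else check)
--     return new_checks, hub_constraints, next_var_id, hub_widths
-- ===== Notes on version B (the rewrite author's own statement) =====
-- stated objective: faster
-- what changed: Instead of rewriting (copying) a whole check once per replaced occurrence, B counts variable degrees in one pass, allocates each high-degree variable a contiguous id block, and rebuilds every check exactly once in a single pass with running per-variable counters.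
import Mathlib
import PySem

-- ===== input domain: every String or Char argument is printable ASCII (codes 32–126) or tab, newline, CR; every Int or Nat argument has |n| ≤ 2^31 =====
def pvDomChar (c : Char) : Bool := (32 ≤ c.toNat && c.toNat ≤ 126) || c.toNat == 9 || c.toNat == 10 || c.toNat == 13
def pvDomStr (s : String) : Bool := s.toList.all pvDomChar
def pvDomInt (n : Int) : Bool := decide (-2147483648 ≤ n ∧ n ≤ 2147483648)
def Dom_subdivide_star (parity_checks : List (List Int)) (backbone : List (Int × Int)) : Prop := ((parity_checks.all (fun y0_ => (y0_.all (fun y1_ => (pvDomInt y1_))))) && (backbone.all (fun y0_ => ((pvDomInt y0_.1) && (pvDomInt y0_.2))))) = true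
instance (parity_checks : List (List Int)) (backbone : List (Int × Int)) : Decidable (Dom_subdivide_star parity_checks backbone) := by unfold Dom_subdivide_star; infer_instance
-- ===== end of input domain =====

-- B replaces A's per-occurrence check copying (one full rebuild of a check per replaced
-- position) by one counting pass, contiguous id blocks per high-degree variable, and a single
-- left-to-right rebuild of every check with running per-variable counters.
-- ===== PORT A =====
def subdivide_star (parity_checks : List (List Int)) (backbone : List (Int × Int)) : List (List Int) × List (List Int) × Int × List Int :=
  -- var_checks = defaultdict(list); for ci, check in enumerate(...): for pos, v in enumerate(check): var_checks[v].append((ci, pos))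
  let var_checks : PySem.Dict Int (List (Int × Int)) :=
    (PySem.List.enumerate parity_checks 0).foldl (fun d cic =>
      (PySem.List.enumerate cic.2 0).foldl (fun d pv =>
        d.modify pv.2 [] (fun l => l ++ [(cic.1, pv.1)])) d) PySem.Dict.empty
  -- next_var_id = max(backbone.keys()) + 1 if backbone else 0   (backbone is a dict)
  let next_var_id : Int :=
    if backbone ≠ [] then
      (PySem.List.max? (PySem.Dict.ofList backbone).keys (fun x => x)).getD 0 + 1
    else 0
  -- main loop over var_checks.items(), state (new_checks, hub_constraints, next_var_id, hub_widths)
  let st : List (List Int) × List (List Int) × Int × List Int :=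
    var_checks.items.foldl (fun st vapp =>
      let appearances := vapp.2
      let k := appearances.length
      if k ≤ 2 then st
      else
        -- edge_vars = []; for i in range(k): edge_vars.append(next_var_id); next_var_id += 1
        let ev : List Int × Int :=
          (PySem.List.pyRange 0 (k : Int) 1).foldl (fun p _ => (p.1 ++ [p.2], p.2 + 1)) ([], st.2.2.1)
        -- for idx, (ci, pos) in enumerate(appearances): check = list(new_checks[ci]); check[pos] = edge_vars[idx]; new_checks[ci] = tuple(check)
        let nc : List (List Int) :=
          (PySem.List.enumerate appearances 0).foldl (fun nc ip =>
            PySem.List.pySetD nc ip.2.1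
              (PySem.List.pySetD (PySem.List.pyGetD nc ip.2.1 []) ip.2.2
                (PySem.List.pyGetD ev.1 ip.1 0))) st.1
        (nc, st.2.1 ++ [ev.1], ev.2, st.2.2.2 ++ [(k : Int)]))
      (parity_checks, [], next_var_id, [])
  st

-- ===== PORT B =====
def subdivide_star_alt (parity_checks : List (List Int)) (backbone : List (Int × Int)) : List (List Int) × List (List Int) × Int × List Int :=
  -- first pass: count occurrences, record first-appearance order
  let co : PySem.Dict Int Int × List Int :=
    parity_checks.foldl (fun co check =>
      check.foldl (fun (co : PySem.Dict Int Int × List Int) v =>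
        let order := if co.1.getD v 0 == 0 then co.2 ++ [v] else co.2
        (co.1.modify v 0 (· + 1), order)) co) (PySem.Dict.empty, [])
  let count := co.1
  let order := co.2
  let nid0 : Int :=
    if backbone ≠ [] then
      (PySem.List.max? (PySem.Dict.ofList backbone).keys (fun x => x)).getD 0 + 1
    else 0
  -- allocate contiguous id blocks for high-degree variables; hubs are ranges
  let bh : PySem.Dict Int Int × List (List Int) × List Int × Int :=
    order.foldl (fun (s : PySem.Dict Int Int × List (List Int) × List Int × Int) v =>
      let k := count.getD v 0
      if k > 2 then
        (s.1.insert v s.2.2.2, s.2.1 ++ [PySem.List.pyRange s.2.2.2 (s.2.2.2 + k) 1],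
         s.2.2.1 ++ [k], s.2.2.2 + k)
      else s) (PySem.Dict.empty, [], [], nid0)
  -- second pass: rebuild each check once, with running per-variable counters
  let res : List (List Int) × PySem.Dict Int Int :=
    parity_checks.foldl (fun r check =>
      let row : List Int × PySem.Dict Int Int × Bool :=
        check.foldl (fun (rs : List Int × PySem.Dict Int Int × Bool) v =>
          if count.getD v 0 > 2 then
            (rs.1 ++ [bh.1.getD v 0 + rs.2.1.getD v 0], rs.2.1.modify v 0 (· + 1), true)
          else (rs.1 ++ [v], rs.2.1, rs.2.2)) ([], r.2, false)
      (r.1 ++ [if row.2.2 then row.1 else check], row.2.1)) ([], PySem.Dict.empty)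
  (res.1, bh.2.1, bh.2.2.2, bh.2.2.1)

-- ===== PRECONDITION & SPEC =====
def Spec_subdivide_star (parity_checks : List (List Int)) (backbone : List (Int × Int)) (out : List (List Int) × List (List Int) × Int × List Int) : Prop := out = subdivide_star_alt parity_checks backbone
instance (parity_checks : List (List Int)) (backbone : List (Int × Int)) (out : List (List Int) × List (List Int) × Int × List Int) : Decidable (Spec_subdivide_star parity_checks backbone out) := by unfold Spec_subdivide_star; infer_instance

-- ===== CLAIM (what is proved, stated in full; the proofs are below) =====
def Claim_equal_subdivide_star : Prop := ∀ (parity_checks : List (List Int)) (backbone : List (Int × Int)), Dom_subdivide_star parity_checks backbone → Spec_subdivide_star parity_checks backbone (subdivide_star parity_checks backbone)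


-- ===== LEMMAS AND PROOFS =====

-- flattened scan of the checks: entries (value, check-index, position), check indices starting at s
def pvFlat (s : Int) : List (List Int) → List (Int × Int × Int)
  | [] => []
  | row :: rest => (PySem.List.enumerate row 0).map (fun pv => (pv.2, s, pv.1)) ++ pvFlat (s+1) rest

def pvCnt (pcs : List (List Int)) (v : Int) : Nat := pcs.flatten.count v
def pvV (pcs : List (List Int)) : List Int := PySem.Set.ofList pcs.flatten
def pvApp (pcs : List (List Int)) (v : Int) : List (Int × Int) :=
  ((pvFlat 0 pcs).filter (fun t => t.1 == v)).map (·.2)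
def pvPref (pcs : List (List Int)) (i j : Nat) : List Int :=
  (pcs.take i).flatten ++ ((pcs.getD i []).take j)

def pvHubs (pcs : List (List Int)) : List Int → Int → List (List Int)
  | [], _ => []
  | v :: W, b => if 2 < pvCnt pcs v then
      PySem.List.pyRange b (b + (pvCnt pcs v : Int)) 1 :: pvHubs pcs W (b + (pvCnt pcs v : Int))
    else pvHubs pcs W b
def pvWidths (pcs : List (List Int)) : List Int → List Int
  | [] => []
  | v :: W => if 2 < pvCnt pcs v then ((pvCnt pcs v : Int)) :: pvWidths pcs W else pvWidths pcs W
def pvNid (pcs : List (List Int)) : List Int → Int → Int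
  | [], b => b
  | v :: W, b => if 2 < pvCnt pcs v then pvNid pcs W (b + (pvCnt pcs v : Int)) else pvNid pcs W b
def pvBase (pcs : List (List Int)) : List Int → Int → Int → Int
  | [], _, _ => 0
  | w :: W, b, v => if 2 < pvCnt pcs w then
      (if v = w then b else pvBase pcs W (b + (pvCnt pcs w : Int)) v)
    else pvBase pcs W b v

def pvRowSpec (pcs : List (List Int)) (b0 : Int) : List Int → List Int → List Int
  | _, [] => []
  | pref, v :: t =>
    (if 2 < pvCnt pcs v then pvBase pcs (pvV pcs) b0 v + ((pref.count v : Int)) else v)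
      :: pvRowSpec pcs b0 (pref ++ [v]) t
def pvGridSpec (pcs : List (List Int)) (b0 : Int) : List Int → List (List Int) → List (List Int)
  | _, [] => []
  | pref, row :: rest => pvRowSpec pcs b0 pref row :: pvGridSpec pcs b0 (pref ++ row) rest

def pvBlock (apps : List (Int × Int)) (b : Int) : List ((Int × Int) × Int) :=
  (PySem.List.enumerate apps 0).map (fun ip => (ip.2, b + ip.1))
def pvU (pcs : List (List Int)) : List Int → Int → List ((Int × Int) × Int)
  | [], _ => []
  | v :: W, b => if 2 < pvCnt pcs v then
      pvBlock (pvApp pcs v) b ++ pvU pcs W (b + (pvCnt pcs v : Int))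
    else pvU pcs W b

def pvApply (g : List (List Int)) (U : List ((Int × Int) × Int)) : List (List Int) :=
  U.foldl (fun nc pv => PySem.List.pySetD nc pv.1.1
    (PySem.List.pySetD (PySem.List.pyGetD nc pv.1.1 []) pv.1.2 pv.2)) g

-- ----- facts about pvFlat -----
theorem pvFlat_append (s : Int) (xs ys : List (List Int)) :
    pvFlat s (xs ++ ys) = pvFlat s xs ++ pvFlat (s + xs.length) ys := by
  induction xs generalizing s with
  | nil => simp [pvFlat]
  | cons r xs ih =>
    simp only [List.cons_append, pvFlat, ih, List.append_assoc, List.length_cons]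
    have : s + 1 + (xs.length : Int) = s + ((xs.length : Nat) + 1 : Nat) := by push_cast; ring
    rw [this]

theorem pvFlat_map_fst (s : Int) (pcs : List (List Int)) :
    (pvFlat s pcs).map (·.1) = pcs.flatten := by
  induction pcs generalizing s with
  | nil => simp [pvFlat]
  | cons r rest ih =>
    simp only [pvFlat, List.map_append, List.map_map, ih, List.flatten_cons]
    congr 1
    have := PySem.List.map_snd_enumerate r (0 : Int)
    calc (PySem.List.enumerate r 0).map ((·.1) ∘ fun pv => (pv.2, s, pv.1))
        = (PySem.List.enumerate r 0).map (·.2) := by rfl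
      _ = r := PySem.List.map_snd_enumerate r 0

theorem pvFlat_ci_bound (s : Int) (pcs : List (List Int)) :
    ∀ t ∈ pvFlat s pcs, s ≤ t.2.1 ∧ t.2.1 < s + pcs.length := by
  induction pcs generalizing s with
  | nil => simp [pvFlat]
  | cons r rest ih =>
    intro t ht
    simp only [pvFlat, List.mem_append, List.mem_map] at ht
    rcases ht with ⟨pv, _, rfl⟩ | ht
    · simp only [List.length_cons]
      constructor
      · simp
      · push_cast
        simp
    · have := ih (s+1) t ht
      simp only [List.length_cons]
      push_cast
      omega

theorem pvFlat_mem_val (s : Int) (pcs : List (List Int)) (t : Int × Int × Int)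
    (ht : t ∈ pvFlat s pcs) :
    ∃ i j : Nat, i < pcs.length ∧ j < ((pcs.getD i []).length) ∧
      t = ((pcs.getD i []).getD j 0, s + (i : Int), (j : Int)) := by
  induction pcs generalizing s with
  | nil => simp [pvFlat] at ht
  | cons r rest ih =>
    simp only [pvFlat, List.mem_append, List.mem_map] at ht
    rcases ht with ⟨pv, hpv, rfl⟩ | ht
    · rw [PySem.List.mem_enumerate_iff] at hpv
      obtain ⟨k, hk, rfl⟩ := hpv
      refine ⟨0, k, by simp, by simpa using hk, ?_⟩
      simp only [List.getD_cons_zero, Nat.cast_zero, add_zero, zero_add]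
      rw [List.getD_eq_getElem r 0 hk]
    · obtain ⟨i, j, hi, hj, rfl⟩ := ih (s+1) ht
      refine ⟨i+1, j, by simpa using hi, by simpa using hj, ?_⟩
      simp only [List.getD_cons_succ]
      have : s + 1 + (i : Int) = s + ((i : Nat) + 1 : Nat) := by push_cast; ring
      rw [this]

theorem pvFlat_pos_nodup (s : Int) (pcs : List (List Int)) :
    ((pvFlat s pcs).map (·.2)).Nodup := by
  induction pcs generalizing s with
  | nil => simp [pvFlat]
  | cons r rest ih =>
    simp only [pvFlat, List.map_append, List.map_map]
    refine List.Nodup.append ?_ (ih (s+1)) ?_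
    · have h1 : (PySem.List.enumerate r (0:Int)).map ((·.2) ∘ fun pv => (pv.2, s, pv.1))
          = ((PySem.List.enumerate r 0).map (·.1)).map (fun x => (s, x)) := by
        simp [List.map_map]
      rw [h1, PySem.List.map_fst_enumerate]
      exact (PySem.List.nodup_pyRange_one _ _).map (fun a b h => by
        simpa using h)
    · intro p hp hq
      simp only [List.mem_map, Function.comp] at hp
      obtain ⟨pv, _, rfl⟩ := hp
      obtain ⟨q, hq', hq2⟩ := List.mem_map.mp hq
      have hb := pvFlat_ci_bound (s+1) rest q hq'
      rw [hq2] at hb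
      dsimp only at hb
      omega

-- ----- facts about pvApp -----
theorem pvApp_length (pcs : List (List Int)) (v : Int) :
    (pvApp pcs v).length = pvCnt pcs v := by
  unfold pvApp pvCnt
  rw [List.length_map, ← List.countP_eq_length_filter, ← pvFlat_map_fst 0 pcs,
    List.count_eq_countP, List.countP_map]
  rfl

theorem pvApp_mem_val (pcs : List (List Int)) (v : Int) (p : Int × Int) (hp : p ∈ pvApp pcs v) :
    ∃ i j : Nat, p = ((i : Int), (j : Int)) ∧ i < pcs.length ∧ j < (pcs.getD i []).length ∧
      (pcs.getD i []).getD j 0 = v := by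
  unfold pvApp at hp
  obtain ⟨t, htf, rfl⟩ := List.mem_map.mp hp
  have ht := List.mem_filter.mp htf
  obtain ⟨i, j, hi, hj, rfl⟩ := pvFlat_mem_val 0 pcs t ht.1
  exact ⟨i, j, by simp, hi, hj, by simpa using ht.2⟩

theorem pvApp_nodup (pcs : List (List Int)) (v : Int) : (pvApp pcs v).Nodup := by
  unfold pvApp
  have hs : ((pvFlat 0 pcs).filter (fun t => t.1 == v)).Sublist (pvFlat 0 pcs) :=
    List.filter_sublist
  exact List.Sublist.nodup (List.Sublist.map (·.2) hs) (pvFlat_pos_nodup 0 pcs)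

theorem pvApp_decomp (pcs : List (List Int)) (i j : Nat)
    (hi : i < pcs.length) (hj : j < (pcs.getD i []).length) :
    ∃ A₁ A₂, pvApp pcs ((pcs.getD i []).getD j 0) = A₁ ++ ((i : Int), (j : Int)) :: A₂ ∧
      A₁.length = (pvPref pcs i j).count ((pcs.getD i []).getD j 0) ∧
      ((i : Int), (j : Int)) ∉ A₁ := by
  have hrow : pcs.getD i [] = pcs[i] := List.getD_eq_getElem pcs [] hi
  have hval : (pcs.getD i []).getD j 0 = (pcs.getD i [])[j] := List.getD_eq_getElem _ 0 hj
  have hsplit : pcs = pcs.take i ++ pcs.getD i [] :: pcs.drop (i+1) := by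
    conv_lhs => rw [← List.take_append_drop i pcs, List.drop_eq_getElem_cons hi]
    rw [hrow]
  have hrsplit : pcs.getD i [] = (pcs.getD i []).take j ++ (pcs.getD i []).getD j 0 :: (pcs.getD i []).drop (j+1) := by
    conv_lhs => rw [← List.take_append_drop j (pcs.getD i []), List.drop_eq_getElem_cons hj]
    rw [hval]
  have henum : PySem.List.enumerate (pcs.getD i []) (0 : Int)
      = PySem.List.enumerate ((pcs.getD i []).take j) 0
        ++ ((j : Int), (pcs.getD i []).getD j 0) :: PySem.List.enumerate ((pcs.getD i []).drop (j+1)) ((j : Int) + 1) := by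
    conv_lhs => rw [hrsplit]
    rw [PySem.List.enumerate_append, PySem.List.enumerate_cons]
    have hlen : ((pcs.getD i []).take j).length = j := by
      rw [List.length_take]
      omega
    rw [hlen]
    norm_num
  have hflat : pvFlat 0 pcs
      = pvFlat 0 (pcs.take i)
        ++ ((PySem.List.enumerate ((pcs.getD i []).take j) (0:Int)).map (fun pv => (pv.2, (i : Int), pv.1))
          ++ ((pcs.getD i []).getD j 0, (i : Int), (j : Int))
            :: ((PySem.List.enumerate ((pcs.getD i []).drop (j+1)) ((j : Int)+1)).map (fun pv => (pv.2, (i : Int), pv.1))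
              ++ pvFlat ((i : Int)+1) (pcs.drop (i+1)))) := by
    conv_lhs => rw [hsplit]
    rw [pvFlat_append]
    have hlen : (pcs.take i).length = i := by
      rw [List.length_take]
      omega
    rw [hlen]
    simp only [pvFlat, zero_add, henum, List.map_append, List.map_cons, List.append_assoc,
      List.cons_append]
  set v := (pcs.getD i []).getD j 0 with hv
  refine ⟨((pvFlat 0 (pcs.take i)
      ++ (PySem.List.enumerate ((pcs.getD i []).take j) (0:Int)).map (fun pv => (pv.2, (i : Int), pv.1))).filter
        (fun t => t.1 == v)).map (·.2),
    (((PySem.List.enumerate ((pcs.getD i []).drop (j+1)) ((j : Int)+1)).map (fun pv => (pv.2, (i : Int), pv.1))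
      ++ pvFlat ((i : Int)+1) (pcs.drop (i+1))).filter (fun t => t.1 == v)).map (·.2), ?_, ?_, ?_⟩
  · unfold pvApp
    rw [hflat]
    simp only [← List.append_assoc]
    rw [List.filter_append, List.filter_append, List.filter_cons]
    simp only [BEq.rfl, if_pos]
    rw [List.map_append, ← List.filter_append]
    simp
  · rw [List.length_map, ← List.countP_eq_length_filter]
    have : (pvFlat 0 (pcs.take i)
        ++ (PySem.List.enumerate ((pcs.getD i []).take j) (0:Int)).map (fun pv => (pv.2, (i : Int), pv.1))).countP
          (fun t => t.1 == v)
        = ((pvFlat 0 (pcs.take i)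
          ++ (PySem.List.enumerate ((pcs.getD i []).take j) (0:Int)).map (fun pv => (pv.2, (i : Int), pv.1))).map (·.1)).count v := by
      rw [List.count_eq_countP, List.countP_map]; rfl
    rw [this, List.map_append, pvFlat_map_fst]
    have : ((PySem.List.enumerate ((pcs.getD i []).take j) (0:Int)).map (fun pv => (pv.2, (i : Int), pv.1))).map (·.1)
        = (pcs.getD i []).take j := by
      rw [List.map_map]
      exact PySem.List.map_snd_enumerate _ _
    rw [this]
    rfl
  · intro hmem
    obtain ⟨t, htf, ht2⟩ := List.mem_map.mp hmem
    have ht := (List.mem_filter.mp htf).1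
    rcases List.mem_append.mp ht with h1 | h2
    · have hb := pvFlat_ci_bound 0 (pcs.take i) t h1
      have : t.2.1 = (i : Int) := by rw [ht2]
      rw [this] at hb
      have : (pcs.take i).length ≤ i := by simp
      have := hb.2
      push_cast at *
      omega
    · obtain ⟨pv, hpv, rfl⟩ := List.mem_map.mp h2
      rw [PySem.List.mem_enumerate_iff] at hpv
      obtain ⟨k, hk, rfl⟩ := hpv
      have hkj : k < j := by
        have : ((pcs.getD i []).take j).length ≤ j := by simp
        omega
      have : ((j : Int)) = ((0 : Int) + (k : Int)) := by
        have := congrArg Prod.snd ht2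
        simpa using this.symm
      omega

-- ----- A: the var_checks dict -----
theorem A_varchecks_fold (pcs : List (List Int)) (s : Int) (d : PySem.Dict Int (List (Int × Int))) :
    (PySem.List.enumerate pcs s).foldl (fun d cic =>
      (PySem.List.enumerate cic.2 0).foldl (fun d pv =>
        d.modify pv.2 [] (fun l => l ++ [(cic.1, pv.1)])) d) d
    = (pvFlat s pcs).foldl (fun d t => d.modify t.1 [] (fun l => l ++ [t.2])) d := by
  induction pcs generalizing s d with
  | nil => simp [pvFlat, PySem.List.enumerate_nil]
  | cons r rest ih =>
    rw [PySem.List.enumerate_cons, List.foldl_cons, pvFlat, List.foldl_append, List.foldl_map, ih]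

theorem A_varchecks_items (pcs : List (List Int)) :
    ((PySem.List.enumerate pcs 0).foldl (fun d cic =>
      (PySem.List.enumerate cic.2 0).foldl (fun d pv =>
        d.modify pv.2 [] (fun l => l ++ [(cic.1, pv.1)])) d) PySem.Dict.empty).items
    = (pvV pcs).map (fun v => (v, pvApp pcs v)) := by
  rw [A_varchecks_fold]
  have hnd : ((pvFlat 0 pcs).foldl (fun d t => d.modify t.1 [] (fun l => l ++ [t.2]))
      (PySem.Dict.empty : PySem.Dict Int (List (Int × Int)))).keys.Nodup :=
    PySem.Dict.nodup_keys_foldl_modify_key (pvFlat 0 pcs) (fun t => t.1) []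
      (fun _ t => fun l => l ++ [t.2]) PySem.Dict.empty PySem.Dict.nodup_keys_empty
  rw [PySem.Dict.items_eq_map_keys _ hnd []]
  have hkeys : ((pvFlat 0 pcs).foldl (fun d t => d.modify t.1 [] (fun l => l ++ [t.2]))
      (PySem.Dict.empty : PySem.Dict Int (List (Int × Int)))).keys = pvV pcs := by
    rw [PySem.Dict.keys_foldl_modify_key (pvFlat 0 pcs) (fun t => t.1) []
      (fun _ t => fun l => l ++ [t.2]) PySem.Dict.empty]
    rw [pvFlat_map_fst]
    simp [pvV, PySem.Dict.keys_empty, PySem.Set.update_nil_left]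
  rw [hkeys]
  refine List.map_eq_map_iff.mpr ?_
  intro v _
  rw [PySem.Dict.getD_foldl_modify_append]
  simp [pvApp, PySem.Dict.getD_empty]

-- ----- A: the edge_vars loop -----
theorem A_edges (k : Nat) (b : Int) :
    (PySem.List.pyRange 0 (k : Int) 1).foldl (fun p _ => (p.1 ++ [p.2], p.2 + 1)) (([] : List Int), b)
    = (PySem.List.pyRange b (b + (k : Int)) 1, b + (k : Int)) := by
  induction k with
  | zero => simp [PySem.List.pyRange_one_eq_nil]
  | succ k ih =>
    have h1 : ((k + 1 : Nat) : Int) = (k : Int) + 1 := by push_cast; ring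
    rw [h1, PySem.List.pyRange_one_succ_right (by positivity : (0:Int) ≤ (k:Int)), List.foldl_append,
      ih, List.foldl_cons, List.foldl_nil, ← add_assoc,
      PySem.List.pyRange_one_succ_right (by omega : b ≤ b + (k:Int))]

-- ----- pvApply -----
theorem pvApply_append (g : List (List Int)) (U₁ U₂ : List ((Int × Int) × Int)) :
    pvApply g (U₁ ++ U₂) = pvApply (pvApply g U₁) U₂ := by
  unfold pvApply
  exact List.foldl_append

theorem pvApply_length (g : List (List Int)) (U : List ((Int × Int) × Int)) :
    (pvApply g U).length = g.length := by
  induction U generalizing g with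
  | nil => rfl
  | cons u U ih =>
    unfold pvApply at *
    rw [List.foldl_cons, ih]
    exact PySem.List.length_pySetD _ _ _

theorem pvGetD_set_self {α : Type} (l : List α) (n : Nat) (x d : α) (h : n < l.length) :
    (l.set n x).getD n d = x := by
  simp [List.getD_eq_getElem?_getD, h]

theorem pvGetD_set_ne {α : Type} (l : List α) (n : Nat) (x d : α) (i : Nat) (h : i ≠ n) :
    (l.set n x).getD i d = l.getD i d := by
  simp [List.getD_eq_getElem?_getD, List.getElem?_set_ne (by omega : n ≠ i)]

theorem pvApply_cons (g : List (List Int)) (a c : Nat) (x : Int) (U : List ((Int × Int) × Int)) :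
    pvApply g ((((a : Int), (c : Int)), x) :: U) = pvApply (g.set a ((g.getD a []).set c x)) U := by
  unfold pvApply
  rw [List.foldl_cons]
  congr 1
  simp [PySem.List.pySetD_natCast, PySem.List.pyGetD_natCast]

theorem pvApply_row_length (g : List (List Int)) (U : List ((Int × Int) × Int))
    (hU : ∀ p ∈ U, ∃ a b : Nat, p.1 = ((a : Int), (b : Int)) ∧ a < g.length ∧ b < (g.getD a []).length)
    (i : Nat) :
    ((pvApply g U).getD i []).length = (g.getD i []).length := by
  induction U generalizing g with
  | nil => rfl
  | cons u U ih =>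
    obtain ⟨a, c, hp, ha, hc⟩ := hU u List.mem_cons_self
    have hu : u = (((a : Int), (c : Int)), u.2) := by rw [← hp]
    rw [hu, pvApply_cons]
    have hrow' : ∀ t : Nat, ((g.set a ((g.getD a []).set c u.2)).getD t []).length = (g.getD t []).length := by
      intro t
      by_cases ht : t = a
      · subst ht
        rw [pvGetD_set_self _ _ _ _ ha, List.length_set]
      · rw [pvGetD_set_ne _ _ _ _ _ ht]
    rw [ih _ (by
      intro p hpU
      obtain ⟨a', c', hp', ha', hc'⟩ := hU p (List.mem_cons_of_mem _ hpU)
      exact ⟨a', c', hp', by simpa using ha', by rw [hrow']; exact hc'⟩)]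
    exact hrow' i

theorem pvApply_getD (g : List (List Int)) (U : List ((Int × Int) × Int))
    (hU : ∀ p ∈ U, ∃ a b : Nat, p.1 = ((a : Int), (b : Int)) ∧ a < g.length ∧ b < (g.getD a []).length)
    (hnd : (U.map (·.1)).Nodup) (i j : Nat) :
    ((pvApply g U).getD i []).getD j 0
    = (match U.find? (fun p => p.1 == ((i : Int), (j : Int))) with
       | some p => p.2
       | none => (g.getD i []).getD j 0) := by
  induction U generalizing g with
  | nil => simp [pvApply, List.find?]
  | cons u U ih =>
    obtain ⟨a, c, hp, ha, hc⟩ := hU u List.mem_cons_self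
    have hu : u = (((a : Int), (c : Int)), u.2) := by rw [← hp]
    have hrow' : ∀ t : Nat, ((g.set a ((g.getD a []).set c u.2)).getD t []).length = (g.getD t []).length := by
      intro t
      by_cases ht : t = a
      · subst ht
        rw [pvGetD_set_self _ _ _ _ ha, List.length_set]
      · rw [pvGetD_set_ne _ _ _ _ _ ht]
    have hU' : ∀ p ∈ U, ∃ a' c' : Nat, p.1 = ((a' : Int), (c' : Int)) ∧
        a' < (g.set a ((g.getD a []).set c u.2)).length ∧
        c' < ((g.set a ((g.getD a []).set c u.2)).getD a' []).length := by
      intro p hpU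
      obtain ⟨a', c', hp', ha', hc'⟩ := hU p (List.mem_cons_of_mem _ hpU)
      exact ⟨a', c', hp', by simpa using ha', by rw [hrow']; exact hc'⟩
    have hnd' : (U.map (·.1)).Nodup := (List.nodup_cons.mp hnd).2
    rw [hu, pvApply_cons, ih _ hU' hnd']
    by_cases heq : u.1 = ((i : Int), (j : Int))
    · have hai : a = i := by
        have h1 := congrArg (fun q => q.1) (hp ▸ heq)
        simpa using h1
      have hcj : c = j := by
        have h1 := congrArg (fun q => q.2) (hp ▸ heq)
        simpa using h1
      have hfindU : U.find? (fun p => p.1 == ((i : Int), (j : Int))) = none := by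
        refine List.find?_eq_none.mpr ?_
        intro p hpU hbeq
        have hpeq : p.1 = u.1 := by rw [heq]; exact eq_of_beq hbeq
        have hmem : u.1 ∈ List.map (fun x => x.1) U := by
          rw [← hpeq]
          exact List.mem_map_of_mem hpU
        exact (List.nodup_cons.mp hnd).1 hmem
      have hfindcons : ((((a : Int), (c : Int)), u.2) :: U).find? (fun p => p.1 == ((i : Int), (j : Int)))
          = some (((a : Int), (c : Int)), u.2) := by
        rw [List.find?_cons_of_pos]
        simp [hai, hcj]
      rw [hfindU, hfindcons]
      rw [hai] at ha
      rw [hai, hcj] at hc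
      rw [hai, hcj]
      rw [pvGetD_set_self _ _ _ _ ha, pvGetD_set_self _ _ _ _ hc]
    · have hpred : (((((a : Int), (c : Int)), u.2) : (Int × Int) × Int).1 == ((i : Int), (j : Int))) = false := by
        simp only [beq_eq_false_iff_ne, ne_eq]
        intro hcon
        exact heq (hp.trans hcon)
      have hfindcons : ((((a : Int), (c : Int)), u.2) :: U).find? (fun p => p.1 == ((i : Int), (j : Int)))
          = U.find? (fun p => p.1 == ((i : Int), (j : Int))) := by
        simp [hpred]
      rw [hfindcons]
      cases hfind : U.find? (fun p => p.1 == ((i : Int), (j : Int))) with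
      | some p => rfl
      | none =>
        have hne : a ≠ i ∨ c ≠ j := by
          rcases eq_or_ne a i with h1 | h1
          · rcases eq_or_ne c j with h2 | h2
            · exact absurd (by rw [hp, h1, h2]) heq
            · exact Or.inr h2
          · exact Or.inl h1
        rcases hne with hne | hne
        · rw [pvGetD_set_ne _ _ _ _ _ (fun h => hne h.symm)]
        · by_cases hai : i = a
          · subst hai
            rw [pvGetD_set_self _ _ _ _ ha, pvGetD_set_ne _ _ _ _ _ (fun h => hne h.symm)]
          · rw [pvGetD_set_ne _ _ _ _ _ hai]

-- ----- pvU -----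
theorem pvBlock_mem (apps : List (Int × Int)) (b : Int) (p : (Int × Int) × Int)
    (hp : p ∈ pvBlock apps b) : p.1 ∈ apps := by
  unfold pvBlock at hp
  obtain ⟨ip, hip, rfl⟩ := List.mem_map.mp hp
  rw [PySem.List.mem_enumerate_iff] at hip
  obtain ⟨k, hk, rfl⟩ := hip
  exact List.getElem_mem hk

theorem pvBlock_map_fst (apps : List (Int × Int)) (b : Int) :
    (pvBlock apps b).map (·.1) = apps := by
  unfold pvBlock
  rw [List.map_map]
  exact PySem.List.map_snd_enumerate _ _

theorem pvU_mem (pcs : List (List Int)) (W : List Int) (b : Int) (p : (Int × Int) × Int)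
    (hp : p ∈ pvU pcs W b) : ∃ w ∈ W, 2 < pvCnt pcs w ∧ p.1 ∈ pvApp pcs w := by
  induction W generalizing b with
  | nil => simp [pvU] at hp
  | cons v W ih =>
    unfold pvU at hp
    by_cases hbig : 2 < pvCnt pcs v
    · rw [if_pos hbig] at hp
      rcases List.mem_append.mp hp with h | h
      · exact ⟨v, List.mem_cons_self, hbig, pvBlock_mem _ _ _ h⟩
      · obtain ⟨w, hw, hb, hm⟩ := ih _ h
        exact ⟨w, List.mem_cons_of_mem _ hw, hb, hm⟩
    · rw [if_neg hbig] at hp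
      obtain ⟨w, hw, hb, hm⟩ := ih _ hp
      exact ⟨w, List.mem_cons_of_mem _ hw, hb, hm⟩

theorem pvU_hU (pcs : List (List Int)) (W : List Int) (b : Int) :
    ∀ p ∈ pvU pcs W b, ∃ a c : Nat, p.1 = ((a : Int), (c : Int)) ∧ a < pcs.length ∧
      c < (pcs.getD a []).length := by
  intro p hp
  obtain ⟨w, _, _, hm⟩ := pvU_mem pcs W b p hp
  obtain ⟨a, c, hpe, ha, hc, _⟩ := pvApp_mem_val pcs w p.1 hm
  exact ⟨a, c, hpe, ha, hc⟩

theorem pvU_pos_nodup (pcs : List (List Int)) (W : List Int) (hW : W.Nodup) (b : Int) :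
    ((pvU pcs W b).map (·.1)).Nodup := by
  induction W generalizing b with
  | nil => simp [pvU]
  | cons v W ih =>
    unfold pvU
    by_cases hbig : 2 < pvCnt pcs v
    · rw [if_pos hbig, List.map_append, pvBlock_map_fst]
      refine List.Nodup.append (pvApp_nodup pcs v) (ih (List.nodup_cons.mp hW).2 _) ?_
      intro q hq hq'
      obtain ⟨u, hu, rfl⟩ := List.mem_map.mp hq'
      obtain ⟨w, hw, hbw, hm⟩ := pvU_mem pcs W _ u hu
      obtain ⟨a, c, hqe, ha, hc, hval⟩ := pvApp_mem_val pcs w u.1 hm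
      obtain ⟨a', c', hqe', ha', hc', hval'⟩ := pvApp_mem_val pcs v u.1 hq
      have haa : a = a' ∧ c = c' := by
        rw [hqe] at hqe'
        have h1 := congrArg (fun q => q.1) hqe'
        have h2 := congrArg (fun q => q.2) hqe'
        simp at h1 h2
        exact ⟨by exact_mod_cast h1, by exact_mod_cast h2⟩
      have : w = v := by rw [← hval, haa.1, haa.2, hval']
      exact (List.nodup_cons.mp hW).1 (this ▸ hw)
    · rw [if_neg hbig]
      exact ih (List.nodup_cons.mp hW).2 _

theorem pvU_find?_eq_none (pcs : List (List Int)) (W : List Int) (b : Int) (i j : Nat)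
    (_hi : i < pcs.length) (_hj : j < (pcs.getD i []).length)
    (hv : ¬ 2 < pvCnt pcs ((pcs.getD i []).getD j 0)) :
    (pvU pcs W b).find? (fun p => p.1 == ((i : Int), (j : Int))) = none := by
  refine List.find?_eq_none.mpr ?_
  intro p hp hbeq
  obtain ⟨w, _, hbw, hm⟩ := pvU_mem pcs W b p hp
  obtain ⟨a, c, hpe, ha, hc, hval⟩ := pvApp_mem_val pcs w p.1 hm
  have hpe2 : p.1 = ((i : Int), (j : Int)) := eq_of_beq hbeq
  rw [hpe2] at hpe
  have h1 := congrArg (fun q => q.1) hpe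
  have h2 := congrArg (fun q => q.2) hpe
  simp at h1 h2
  rw [← h1, ← h2] at hval
  rw [← hval] at hbw
  exact hv hbw

theorem pvU_find?_eq_some (pcs : List (List Int)) (W : List Int) (hW : W.Nodup) (b : Int)
    (i j : Nat) (hi : i < pcs.length) (hj : j < (pcs.getD i []).length)
    (hv : (pcs.getD i []).getD j 0 ∈ W) (hbig : 2 < pvCnt pcs ((pcs.getD i []).getD j 0)) :
    (pvU pcs W b).find? (fun p => p.1 == ((i : Int), (j : Int)))
    = some (((i : Int), (j : Int)),
        pvBase pcs W b ((pcs.getD i []).getD j 0) + ((pvPref pcs i j).count ((pcs.getD i []).getD j 0) : Int)) := by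
  induction W generalizing b with
  | nil => simp at hv
  | cons w W ih =>
    have hblock_ne : ∀ w', w' ≠ (pcs.getD i []).getD j 0 → ∀ b',
        (pvBlock (pvApp pcs w') b').find? (fun p => p.1 == ((i : Int), (j : Int))) = none := by
      intro w' hne b'
      refine List.find?_eq_none.mpr ?_
      intro p hp hbeq
      have hm := pvBlock_mem _ _ _ hp
      obtain ⟨a, c, hpe, ha, hc, hval⟩ := pvApp_mem_val pcs w' p.1 hm
      have hpe2 : p.1 = ((i : Int), (j : Int)) := eq_of_beq hbeq
      rw [hpe2] at hpe
      have h1 := congrArg (fun q => q.1) hpe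
      have h2 := congrArg (fun q => q.2) hpe
      simp at h1 h2
      rw [← h1, ← h2] at hval
      exact hne hval.symm
    unfold pvU
    rcases List.mem_cons.mp hv with hvw | hvW
    · -- w is the variable of position (i, j)
      rw [← hvw]
      rw [if_pos (hvw ▸ hbig)]
      obtain ⟨A₁, A₂, hdec, hlen, hnotmem⟩ := pvApp_decomp pcs i j hi hj
      have hfind_block : (pvBlock (pvApp pcs ((pcs.getD i []).getD j 0)) b).find?
          (fun p => p.1 == ((i : Int), (j : Int)))
          = some (((i : Int), (j : Int)), b + (A₁.length : Int)) := by
        rw [hdec]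
        unfold pvBlock
        rw [PySem.List.enumerate_append, PySem.List.enumerate_cons, List.map_append, List.map_cons]
        rw [List.find?_append]
        have h1 : ((PySem.List.enumerate A₁ 0).map (fun ip => (ip.2, b + ip.1))).find?
            (fun p => p.1 == ((i : Int), (j : Int))) = none := by
          refine List.find?_eq_none.mpr ?_
          intro p hp hbeq
          obtain ⟨ip, hip, rfl⟩ := List.mem_map.mp hp
          rw [PySem.List.mem_enumerate_iff] at hip
          obtain ⟨k, hk, rfl⟩ := hip
          exact hnotmem (eq_of_beq hbeq ▸ List.getElem_mem hk)
        rw [h1]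
        simp only [Option.none_or]
        rw [List.find?_cons_of_pos (by simp)]
        simp
      rw [List.find?_append, hfind_block]
      simp only [Option.some_or]
      rw [hlen]
      unfold pvBase
      rw [if_pos (hvw ▸ hbig), if_pos rfl]
    · -- w is some other variable
      have hne : (pcs.getD i []).getD j 0 ≠ w := by
        intro hcon
        exact (List.nodup_cons.mp hW).1 (hcon ▸ hvW)
      by_cases hbw : 2 < pvCnt pcs w
      · rw [if_pos hbw, List.find?_append, hblock_ne w (fun h => hne h.symm) b]
        simp only [Option.none_or]
        rw [ih (List.nodup_cons.mp hW).2 _ hvW]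
        simp only [pvBase]
        rw [if_pos hbw, if_neg hne]
      · rw [if_neg hbw, ih (List.nodup_cons.mp hW).2 _ hvW]
        simp only [pvBase]
        rw [if_neg hbw]

-- ----- A: the main loop -----
def pvAStep (pcs : List (List Int)) (st : List (List Int) × List (List Int) × Int × List Int)
    (v : Int) : List (List Int) × List (List Int) × Int × List Int :=
  (fun st (vapp : Int × List (Int × Int)) =>
    let appearances := vapp.2
    let k : Int := appearances.length
    if k ≤ 2 then st
    else
      let ev : List Int × Int :=
        (PySem.List.pyRange 0 k 1).foldl (fun p _ => (p.1 ++ [p.2], p.2 + 1)) ([], st.2.2.1)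
      let nc : List (List Int) :=
        (PySem.List.enumerate appearances 0).foldl (fun nc ip =>
          PySem.List.pySetD nc ip.2.1
            (PySem.List.pySetD (PySem.List.pyGetD nc ip.2.1 []) ip.2.2
              (PySem.List.pyGetD ev.1 ip.1 0))) st.1
      (nc, st.2.1 ++ [ev.1], ev.2, st.2.2.2 ++ [k])) st (v, pvApp pcs v)

theorem pvAStep_small (pcs : List (List Int)) (st : List (List Int) × List (List Int) × Int × List Int)
    (v : Int) (h : ¬ 2 < pvCnt pcs v) : pvAStep pcs st v = st := by
  unfold pvAStep
  dsimp only
  split_ifs with hc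
  · rfl
  · exfalso
    apply hc
    have := pvApp_length pcs v
    omega

theorem pvBlock_eq_map (pcs : List (List Int)) (v : Int) (b : Int) :
    (PySem.List.enumerate (pvApp pcs v) 0).map (fun ip =>
      (ip.2, PySem.List.pyGetD (PySem.List.pyRange b (b + ((pvApp pcs v).length : Int)) 1) ip.1 0))
    = pvBlock (pvApp pcs v) b := by
  unfold pvBlock
  refine List.map_eq_map_iff.mpr ?_
  intro ip hip
  rw [PySem.List.mem_enumerate_iff] at hip
  obtain ⟨m, hm, rfl⟩ := hip
  have h0 : ((0 : Int) + (m : Int)) = ((m : Nat) : Int) := by ring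
  simp only [h0]
  rw [PySem.List.pyGetD_natCast, PySem.List.pyRange_one]
  have h1 : ((b + ((pvApp pcs v).length : Int)) - b).toNat = (pvApp pcs v).length := by
    omega
  rw [h1, PySem.List.getD_map_range _ _ _ _ hm]

theorem pvAStep_big (pcs : List (List Int)) (g H : List (List Int)) (b : Int) (D : List Int)
    (v : Int) (hbig : 2 < pvCnt pcs v) :
    pvAStep pcs (g, H, b, D) v
    = (pvApply g (pvBlock (pvApp pcs v) b),
       H ++ [PySem.List.pyRange b (b + ((pvApp pcs v).length : Int)) 1],
       b + ((pvApp pcs v).length : Int), D ++ [(((pvApp pcs v).length : Nat) : Int)]) := by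
  unfold pvAStep
  dsimp only
  split_ifs with hc
  · exfalso
    have := pvApp_length pcs v
    omega
  · rw [A_edges]
    dsimp only
    congr 1
    rw [← pvBlock_eq_map pcs v b]
    unfold pvApply
    rw [List.foldl_map]

theorem A_main (pcs : List (List Int)) (W : List Int) (g : List (List Int))
    (H : List (List Int)) (b : Int) (D : List Int) :
    W.foldl (pvAStep pcs) (g, H, b, D)
    = (pvApply g (pvU pcs W b), H ++ pvHubs pcs W b, pvNid pcs W b, D ++ pvWidths pcs W) := by
  induction W generalizing g H b D with
  | nil => simp [pvU, pvHubs, pvNid, pvWidths, pvApply]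
  | cons v W ih =>
    rw [List.foldl_cons]
    by_cases hbig : 2 < pvCnt pcs v
    · rw [pvAStep_big pcs g H b D v hbig, ih, pvApp_length]
      simp only [pvU, pvHubs, pvNid, pvWidths, if_pos hbig]
      rw [pvApply_append]
      simp [List.append_assoc]
    · rw [pvAStep_small pcs _ v hbig, ih]
      simp only [pvU, pvHubs, pvNid, pvWidths, if_neg hbig]

-- ----- spec grid characterisation -----
theorem pvRowSpec_length (pcs : List (List Int)) (b0 : Int) (pref check : List Int) :
    (pvRowSpec pcs b0 pref check).length = check.length := by
  induction check generalizing pref with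
  | nil => rfl
  | cons v t ih => simp [pvRowSpec, ih]

theorem pvGridSpec_length (pcs : List (List Int)) (b0 : Int) (pref : List Int) (rest : List (List Int)) :
    (pvGridSpec pcs b0 pref rest).length = rest.length := by
  induction rest generalizing pref with
  | nil => rfl
  | cons r t ih => simp [pvGridSpec, ih]

theorem pvGridSpec_row (pcs : List (List Int)) (b0 : Int) (pref : List Int) (rest : List (List Int))
    (i : Nat) (hi : i < rest.length) :
    (pvGridSpec pcs b0 pref rest).getD i [] =
      pvRowSpec pcs b0 (pref ++ (rest.take i).flatten) (rest.getD i []) := by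
  induction rest generalizing pref i with
  | nil => simp at hi
  | cons r t ih =>
    cases i with
    | zero => simp [pvGridSpec]
    | succ i =>
      simp only [pvGridSpec, List.getD_cons_succ]
      rw [ih _ _ (by simpa using hi)]
      simp [List.append_assoc]

theorem pvRowSpec_getD (pcs : List (List Int)) (b0 : Int) (pref check : List Int) (j : Nat)
    (hj : j < check.length) :
    (pvRowSpec pcs b0 pref check).getD j 0
    = (if 2 < pvCnt pcs (check.getD j 0) then
        pvBase pcs (pvV pcs) b0 (check.getD j 0) + (((pref ++ check.take j).count (check.getD j 0) : Nat) : Int)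
      else check.getD j 0) := by
  induction check generalizing pref j with
  | nil => simp at hj
  | cons v t ih =>
    cases j with
    | zero => simp [pvRowSpec]
    | succ j =>
      simp only [pvRowSpec, List.getD_cons_succ, List.take_succ_cons]
      rw [ih _ _ (by simpa using hj)]
      simp [List.append_assoc]

theorem pvRowSpec_of_no_big (pcs : List (List Int)) (b0 : Int) (pref check : List Int)
    (h : ∀ v ∈ check, ¬ 2 < pvCnt pcs v) : pvRowSpec pcs b0 pref check = check := by
  induction check generalizing pref with
  | nil => rfl
  | cons v t ih =>
    simp only [pvRowSpec, if_neg (h v List.mem_cons_self)]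
    rw [ih _ (fun w hw => h w (List.mem_cons_of_mem _ hw))]

-- ----- A grid = spec grid -----
theorem A_grid (pcs : List (List Int)) (b0 : Int) :
    pvApply pcs (pvU pcs (pvV pcs) b0) = pvGridSpec pcs b0 [] pcs := by
  have hndV : (pvV pcs).Nodup := PySem.Set.nodup_ofList pcs.flatten
  have hU := pvU_hU pcs (pvV pcs) b0
  have hnd := pvU_pos_nodup pcs (pvV pcs) hndV b0
  refine List.ext_getElem (by rw [pvApply_length, pvGridSpec_length]) ?_
  intro i hi1 hi2
  have hilen : i < pcs.length := by rwa [pvApply_length] at hi1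
  refine List.ext_getElem ?_ ?_
  · rw [← List.getD_eq_getElem _ [] hi1, ← List.getD_eq_getElem _ [] hi2,
      pvApply_row_length pcs _ hU, pvGridSpec_row pcs b0 [] pcs i hilen, pvRowSpec_length]
  · intro j hj1 hj2
    have hjlen : j < (pcs.getD i []).length := by
      rw [← List.getD_eq_getElem _ [] hi1, pvApply_row_length pcs _ hU] at hj1
      exact hj1
    have hL : ((pvApply pcs (pvU pcs (pvV pcs) b0))[i])[j]
        = (((pvApply pcs (pvU pcs (pvV pcs) b0)).getD i []).getD j 0) := by
      rw [List.getD_eq_getElem _ [] hi1, List.getD_eq_getElem _ 0 hj1]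
    have hR : ((pvGridSpec pcs b0 [] pcs)[i])[j]
        = (((pvGridSpec pcs b0 [] pcs).getD i []).getD j 0) := by
      rw [List.getD_eq_getElem _ [] hi2, List.getD_eq_getElem _ 0 hj2]
    rw [hL, hR, pvApply_getD pcs _ hU hnd i j,
      pvGridSpec_row pcs b0 [] pcs i hilen, pvRowSpec_getD pcs b0 _ _ j hjlen]
    set v := (pcs.getD i []).getD j 0 with hv
    by_cases hbig : 2 < pvCnt pcs v
    · have hvV : v ∈ pvV pcs := by
        refine (PySem.Set.mem_ofList _ _).mpr ?_
        refine List.mem_flatten.mpr ⟨pcs.getD i [], ?_, ?_⟩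
        · rw [List.getD_eq_getElem _ [] hilen]
          exact List.getElem_mem hilen
        · rw [hv]
          rw [List.getD_eq_getElem _ 0 hjlen]
          exact List.getElem_mem hjlen
      rw [pvU_find?_eq_some pcs (pvV pcs) hndV b0 i j hilen hjlen hvV hbig]
      rw [if_pos hbig]
      unfold pvPref
      simp
      rfl
    · rw [pvU_find?_eq_none pcs (pvV pcs) b0 i j hilen hjlen hbig]
      rw [if_neg hbig]

-- ----- B: the counting pass -----
theorem B_co (pcs : List (List Int)) :
    pcs.foldl (fun co check =>
      check.foldl (fun (co : PySem.Dict Int Int × List Int) v =>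
        let order := if co.1.getD v 0 == 0 then co.2 ++ [v] else co.2
        (co.1.modify v 0 (· + 1), order)) co) (PySem.Dict.empty, [])
    = (pcs.flatten.foldl (fun d x => d.modify x 0 (· + 1)) PySem.Dict.empty, pvV pcs) := by
  rw [← List.foldl_flatten]
  have aux : ∀ (l : List Int) (d : PySem.Dict Int Int) (s : List Int),
      (∀ v, 0 ≤ d.getD v 0) → (∀ v, d.getD v 0 = 0 ↔ v ∉ s) →
      l.foldl (fun (co : PySem.Dict Int Int × List Int) v =>
        let order := if co.1.getD v 0 == 0 then co.2 ++ [v] else co.2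
        (co.1.modify v 0 (· + 1), order)) (d, s)
      = (l.foldl (fun d x => d.modify x 0 (· + 1)) d, PySem.Set.update s l) := by
    intro l
    induction l with
    | nil =>
      intro d s _ _
      simp [PySem.Set.update_nil]
    | cons x t ih =>
      intro d s hpos hiff
      rw [List.foldl_cons, List.foldl_cons]
      have horder : (if d.getD x 0 == 0 then s ++ [x] else s) = PySem.Set.add s x := by
        by_cases hx : x ∈ s
        · rw [if_neg (by simpa [(hiff x)] using hx), PySem.Set.add_of_mem hx]
        · rw [if_pos (by simpa [(hiff x)] using hx), PySem.Set.add_of_not_mem hx]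
      dsimp only
      rw [horder, PySem.Set.update_cons]
      refine ih _ _ ?_ ?_
      · intro v
        rw [PySem.Dict.getD_modify]
        split_ifs with h
        · have := hpos x
          omega
        · exact hpos v
      · intro v
        rw [PySem.Dict.getD_modify, PySem.Set.mem_add]
        split_ifs with h
        · subst h
          constructor
          · intro hcon
            have := hpos v
            omega
          · intro hcon
            exact absurd (Or.inr rfl) hcon
        · rw [hiff v]
          constructor
          · intro hv hcon
            rcases hcon with hcon | hcon
            · exact hv hcon
            · exact h hcon
          · intro hv hcon
            exact hv (Or.inl hcon)
  rw [aux pcs.flatten PySem.Dict.empty [] (fun v => by simp [PySem.Dict.getD_empty])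
    (fun v => by simp [PySem.Dict.getD_empty])]
  rw [PySem.Set.update_nil_left]
  rfl

-- ----- B: the allocation pass -----
theorem B_alloc (pcs : List (List Int)) (W : List Int) (hW : W.Nodup)
    (d : PySem.Dict Int Int) (H : List (List Int)) (D : List Int) (b : Int) :
    (W.foldl (fun (s : PySem.Dict Int Int × List (List Int) × List Int × Int) v =>
      if ((pvCnt pcs v : Int)) > 2 then
        (s.1.insert v s.2.2.2, s.2.1 ++ [PySem.List.pyRange s.2.2.2 (s.2.2.2 + ((pvCnt pcs v : Int))) 1],
         s.2.2.1 ++ [((pvCnt pcs v : Int))], s.2.2.2 + ((pvCnt pcs v : Int)))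
      else s) (d, H, D, b)).2
    = (H ++ pvHubs pcs W b, D ++ pvWidths pcs W, pvNid pcs W b) := by
  induction W generalizing d H D b with
  | nil => simp [pvHubs, pvWidths, pvNid]
  | cons v W ih =>
    rw [List.foldl_cons]
    by_cases hbig : 2 < pvCnt pcs v
    · have hbig' : ((pvCnt pcs v : Int)) > 2 := by exact_mod_cast hbig
      dsimp only
      rw [if_pos hbig']
      rw [ih (List.nodup_cons.mp hW).2]
      simp only [pvHubs, pvWidths, pvNid, if_pos hbig]
      simp [List.append_assoc]
    · have hbig' : ¬ ((pvCnt pcs v : Int)) > 2 := by exact_mod_cast hbig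
      dsimp only
      rw [if_neg hbig']
      rw [ih (List.nodup_cons.mp hW).2]
      simp only [pvHubs, pvWidths, pvNid, if_neg hbig]

theorem B_alloc_base (pcs : List (List Int)) (W : List Int) (hW : W.Nodup)
    (d : PySem.Dict Int Int) (H : List (List Int)) (D : List Int) (b : Int) (v : Int)
    (hv : v ∈ W) (hbig : 2 < pvCnt pcs v) :
    (W.foldl (fun (s : PySem.Dict Int Int × List (List Int) × List Int × Int) v =>
      if ((pvCnt pcs v : Int)) > 2 then
        (s.1.insert v s.2.2.2, s.2.1 ++ [PySem.List.pyRange s.2.2.2 (s.2.2.2 + ((pvCnt pcs v : Int))) 1],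
         s.2.2.1 ++ [((pvCnt pcs v : Int))], s.2.2.2 + ((pvCnt pcs v : Int)))
      else s) (d, H, D, b)).1.getD v 0
    = pvBase pcs W b v := by
  induction W generalizing d H D b with
  | nil => simp at hv
  | cons w W ih =>
    have untouched : ∀ (W' : List Int), v ∉ W' → ∀ (d' : PySem.Dict Int Int) H' D' b',
        (W'.foldl (fun (s : PySem.Dict Int Int × List (List Int) × List Int × Int) v =>
          if ((pvCnt pcs v : Int)) > 2 then
            (s.1.insert v s.2.2.2, s.2.1 ++ [PySem.List.pyRange s.2.2.2 (s.2.2.2 + ((pvCnt pcs v : Int))) 1],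
             s.2.2.1 ++ [((pvCnt pcs v : Int))], s.2.2.2 + ((pvCnt pcs v : Int)))
          else s) (d', H', D', b')).1.getD v 0 = d'.getD v 0 := by
      intro W'
      induction W' with
      | nil => intro _ d' H' D' b'; rfl
      | cons w' W' ih' =>
        intro hnv d' H' D' b'
        rw [List.foldl_cons]
        dsimp only
        split_ifs with hb
        · rw [ih' (fun h => hnv (List.mem_cons_of_mem _ h)),
            PySem.Dict.getD_insert_of_ne _ _ _ (show v ≠ w' from fun heq => hnv (by rw [heq]; exact List.mem_cons_self))]
        · exact ih' (fun h => hnv (List.mem_cons_of_mem _ h)) _ _ _ _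
    rw [List.foldl_cons]
    rcases List.mem_cons.mp hv with hvw | hvW
    · subst hvw
      have hbig' : ((pvCnt pcs v : Int)) > 2 := by exact_mod_cast hbig
      dsimp only
      rw [if_pos hbig']
      rw [untouched W (List.nodup_cons.mp hW).1 _ _ _ _, PySem.Dict.getD_insert_self]
      simp [pvBase, hbig]
    · have hne : v ≠ w := fun h => (List.nodup_cons.mp hW).1 (h ▸ hvW)
      dsimp only
      by_cases hbw : 2 < pvCnt pcs w
      · rw [if_pos (by exact_mod_cast hbw : ((pvCnt pcs w : Int)) > 2)]
        rw [ih (List.nodup_cons.mp hW).2 _ _ _ _ hvW]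
        simp only [pvBase]
        rw [if_pos hbw, if_neg hne]
      · rw [if_neg (by exact_mod_cast hbw : ¬ ((pvCnt pcs w : Int)) > 2)]
        rw [ih (List.nodup_cons.mp hW).2 _ _ _ _ hvW]
        simp only [pvBase]
        rw [if_neg hbw]

-- ----- B: the rebuild pass -----
theorem B_row (pcs : List (List Int)) (b0 : Int) (bd seen : PySem.Dict Int Int)
    (check pref acc : List Int) (flag : Bool)
    (hbd : ∀ v, 2 < pvCnt pcs v → bd.getD v 0 = pvBase pcs (pvV pcs) b0 v)
    (hseen : ∀ v, 2 < pvCnt pcs v → seen.getD v 0 = ((pref.count v : Nat) : Int)) :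
    (check.foldl (fun (rs : List Int × PySem.Dict Int Int × Bool) v =>
        if ((pvCnt pcs v : Int)) > 2 then
          (rs.1 ++ [bd.getD v 0 + rs.2.1.getD v 0], rs.2.1.modify v 0 (· + 1), true)
        else (rs.1 ++ [v], rs.2.1, rs.2.2)) (acc, seen, flag)).1
      = acc ++ pvRowSpec pcs b0 pref check ∧
    (∀ v, 2 < pvCnt pcs v →
      (check.foldl (fun (rs : List Int × PySem.Dict Int Int × Bool) v =>
        if ((pvCnt pcs v : Int)) > 2 then
          (rs.1 ++ [bd.getD v 0 + rs.2.1.getD v 0], rs.2.1.modify v 0 (· + 1), true)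
        else (rs.1 ++ [v], rs.2.1, rs.2.2)) (acc, seen, flag)).2.1.getD v 0
        = (((pref ++ check).count v : Nat) : Int)) ∧
    (check.foldl (fun (rs : List Int × PySem.Dict Int Int × Bool) v =>
        if ((pvCnt pcs v : Int)) > 2 then
          (rs.1 ++ [bd.getD v 0 + rs.2.1.getD v 0], rs.2.1.modify v 0 (· + 1), true)
        else (rs.1 ++ [v], rs.2.1, rs.2.2)) (acc, seen, flag)).2.2
      = (flag || check.any (fun v => decide (2 < pvCnt pcs v))) := by
  induction check generalizing pref acc seen flag hseen with
  | nil =>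
    refine ⟨by simp [pvRowSpec], ?_, by simp⟩
    intro w hw
    rw [List.foldl_nil]
    rw [hseen w hw]
    simp
  | cons v t ih =>
    rw [List.foldl_cons]
    dsimp only
    by_cases hbig : 2 < pvCnt pcs v
    · rw [if_pos (by exact_mod_cast hbig : ((pvCnt pcs v : Int)) > 2)]
      rw [hbd v hbig, hseen v hbig]
      have hseen' : ∀ w, 2 < pvCnt pcs w →
          (seen.modify v 0 (· + 1)).getD w 0 = ((((pref ++ [v]).count w : Nat)) : Int) := by
        intro w hw
        rw [PySem.Dict.getD_modify]
        split_ifs with hwv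
        · subst hwv
          rw [hseen w hw]
          simp [List.count_append]
        · rw [hseen w hw]
          simp [List.count_append, List.count_singleton]
          omega
      obtain ⟨h1, h2, h3⟩ := ih (seen := seen.modify v 0 (· + 1)) (pref := pref ++ [v])
        (acc := acc ++ [pvBase pcs (pvV pcs) b0 v + (((pref.count v : Nat)) : Int)])
        (flag := true) (hseen := hseen')
      refine ⟨?_, ?_, ?_⟩
      · rw [h1]
        simp only [pvRowSpec, if_pos hbig]
        simp [List.append_assoc]
      · intro w hw
        rw [h2 w hw]
        simp [List.append_assoc]
      · rw [h3]
        simp [hbig]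
    · rw [if_neg (by exact_mod_cast hbig : ¬ ((pvCnt pcs v : Int)) > 2)]
      have hseen' : ∀ w, 2 < pvCnt pcs w →
          seen.getD w 0 = ((((pref ++ [v]).count w : Nat)) : Int) := by
        intro w hw
        rw [hseen w hw]
        have hne : w ≠ v := fun h => hbig (h ▸ hw)
        simp [List.count_append, List.count_singleton]
        omega
      obtain ⟨h1, h2, h3⟩ := ih (seen := seen) (pref := pref ++ [v]) (acc := acc ++ [v])
        (flag := flag) (hseen := hseen')
      refine ⟨?_, ?_, ?_⟩
      · rw [h1]
        simp only [pvRowSpec, if_neg hbig]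
        simp [List.append_assoc]
      · intro w hw
        rw [h2 w hw]
        simp [List.append_assoc]
      · rw [h3]
        simp [hbig]

theorem B_grid (pcs rest : List (List Int)) (b0 : Int) (bd seen : PySem.Dict Int Int)
    (pref : List Int) (acc : List (List Int))
    (hbd : ∀ v, 2 < pvCnt pcs v → bd.getD v 0 = pvBase pcs (pvV pcs) b0 v)
    (hseen : ∀ v, 2 < pvCnt pcs v → seen.getD v 0 = ((pref.count v : Nat) : Int)) :
    (rest.foldl (fun (r : List (List Int) × PySem.Dict Int Int) check =>
      (r.1 ++ [if (check.foldl (fun (rs : List Int × PySem.Dict Int Int × Bool) v =>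
          if ((pvCnt pcs v : Int)) > 2 then
            (rs.1 ++ [bd.getD v 0 + rs.2.1.getD v 0], rs.2.1.modify v 0 (· + 1), true)
          else (rs.1 ++ [v], rs.2.1, rs.2.2)) ([], r.2, false)).2.2
        then (check.foldl (fun (rs : List Int × PySem.Dict Int Int × Bool) v =>
          if ((pvCnt pcs v : Int)) > 2 then
            (rs.1 ++ [bd.getD v 0 + rs.2.1.getD v 0], rs.2.1.modify v 0 (· + 1), true)
          else (rs.1 ++ [v], rs.2.1, rs.2.2)) ([], r.2, false)).1
        else check],
       (check.foldl (fun (rs : List Int × PySem.Dict Int Int × Bool) v =>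
          if ((pvCnt pcs v : Int)) > 2 then
            (rs.1 ++ [bd.getD v 0 + rs.2.1.getD v 0], rs.2.1.modify v 0 (· + 1), true)
          else (rs.1 ++ [v], rs.2.1, rs.2.2)) ([], r.2, false)).2.1)) (acc, seen)).1
    = acc ++ pvGridSpec pcs b0 pref rest := by
  induction rest generalizing pref acc seen hseen with
  | nil => simp [pvGridSpec]
  | cons check t ih =>
    rw [List.foldl_cons]
    dsimp only
    obtain ⟨h1, h2, h3⟩ := B_row pcs b0 bd seen check pref [] false hbd hseen
    simp only [Bool.false_or] at h3
    have hentry : (if (check.foldl (fun (rs : List Int × PySem.Dict Int Int × Bool) v =>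
          if ((pvCnt pcs v : Int)) > 2 then
            (rs.1 ++ [bd.getD v 0 + rs.2.1.getD v 0], rs.2.1.modify v 0 (· + 1), true)
          else (rs.1 ++ [v], rs.2.1, rs.2.2)) ([], seen, false)).2.2
        then (check.foldl (fun (rs : List Int × PySem.Dict Int Int × Bool) v =>
          if ((pvCnt pcs v : Int)) > 2 then
            (rs.1 ++ [bd.getD v 0 + rs.2.1.getD v 0], rs.2.1.modify v 0 (· + 1), true)
          else (rs.1 ++ [v], rs.2.1, rs.2.2)) ([], seen, false)).1
        else check) = pvRowSpec pcs b0 pref check := by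
      rw [h3, h1]
      by_cases hany : check.any (fun v => decide (2 < pvCnt pcs v)) = true
      · simp [hany]
      · simp only [Bool.not_eq_true] at hany
        rw [hany]
        simp only [Bool.false_eq_true, if_false]
        refine (pvRowSpec_of_no_big pcs b0 pref check ?_).symm
        intro v hv
        have := List.any_eq_false.mp hany v hv
        simpa using this
    rw [hentry, ih (seen := (check.foldl (fun (rs : List Int × PySem.Dict Int Int × Bool) v =>
          if ((pvCnt pcs v : Int)) > 2 then
            (rs.1 ++ [bd.getD v 0 + rs.2.1.getD v 0], rs.2.1.modify v 0 (· + 1), true)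
          else (rs.1 ++ [v], rs.2.1, rs.2.2)) ([], seen, false)).2.1)
      (pref := pref ++ check) (acc := acc ++ [pvRowSpec pcs b0 pref check]) (hseen := h2)]
    simp [pvGridSpec, List.append_assoc]

-- ----- the two ports against the common normal form -----
theorem A_normal (pcs : List (List Int)) (bb : List (Int × Int)) :
    subdivide_star pcs bb
    = (pvGridSpec pcs (if bb ≠ [] then (PySem.List.max? (PySem.Dict.ofList bb).keys (fun x => x)).getD 0 + 1 else 0) [] pcs,
       pvHubs pcs (pvV pcs) (if bb ≠ [] then (PySem.List.max? (PySem.Dict.ofList bb).keys (fun x => x)).getD 0 + 1 else 0),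
       pvNid pcs (pvV pcs) (if bb ≠ [] then (PySem.List.max? (PySem.Dict.ofList bb).keys (fun x => x)).getD 0 + 1 else 0),
       pvWidths pcs (pvV pcs)) := by
  simp only [subdivide_star]
  rw [A_varchecks_items, List.foldl_map]
  show (pvV pcs).foldl (pvAStep pcs)
      (pcs, [], (if bb ≠ [] then (PySem.List.max? (PySem.Dict.ofList bb).keys (fun x => x)).getD 0 + 1 else 0), []) = _
  rw [A_main, A_grid]
  simp

theorem B_normal (pcs : List (List Int)) (bb : List (Int × Int)) :
    subdivide_star_alt pcs bb
    = (pvGridSpec pcs (if bb ≠ [] then (PySem.List.max? (PySem.Dict.ofList bb).keys (fun x => x)).getD 0 + 1 else 0) [] pcs,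
       pvHubs pcs (pvV pcs) (if bb ≠ [] then (PySem.List.max? (PySem.Dict.ofList bb).keys (fun x => x)).getD 0 + 1 else 0),
       pvNid pcs (pvV pcs) (if bb ≠ [] then (PySem.List.max? (PySem.Dict.ofList bb).keys (fun x => x)).getD 0 + 1 else 0),
       pvWidths pcs (pvV pcs)) := by
  have hndV : (pvV pcs).Nodup := PySem.Set.nodup_ofList pcs.flatten
  have hcount : ∀ v : Int,
      (pcs.flatten.foldl (fun d x => d.modify x 0 (· + 1)) PySem.Dict.empty).getD v 0
      = (((pvCnt pcs v : Nat)) : Int) := by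
    intro v
    rw [PySem.Dict.getD_foldl_modify_add_one]
    simp [pvCnt, PySem.Dict.getD_empty]
  simp only [subdivide_star_alt]
  rw [B_co]
  simp only [hcount]
  have hbd : ∀ v, 2 < pvCnt pcs v →
      (((pvV pcs).foldl (fun (s : PySem.Dict Int Int × List (List Int) × List Int × Int) v =>
        if ((pvCnt pcs v : Int)) > 2 then
          (s.1.insert v s.2.2.2, s.2.1 ++ [PySem.List.pyRange s.2.2.2 (s.2.2.2 + ((pvCnt pcs v : Int))) 1],
           s.2.2.1 ++ [((pvCnt pcs v : Int))], s.2.2.2 + ((pvCnt pcs v : Int)))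
        else s) (PySem.Dict.empty, [], [],
          (if bb ≠ [] then (PySem.List.max? (PySem.Dict.ofList bb).keys (fun x => x)).getD 0 + 1 else 0))).1.getD v 0)
      = pvBase pcs (pvV pcs)
          (if bb ≠ [] then (PySem.List.max? (PySem.Dict.ofList bb).keys (fun x => x)).getD 0 + 1 else 0) v := by
    intro v hv
    refine B_alloc_base pcs (pvV pcs) hndV _ _ _ _ v ?_ hv
    refine (PySem.Set.mem_ofList _ _).mpr ?_
    have : 0 < pcs.flatten.count v := by
      have := hv
      unfold pvCnt at this
      omega
    exact List.count_pos_iff.mp this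
  rw [B_alloc pcs (pvV pcs) hndV PySem.Dict.empty [] []
    (if bb ≠ [] then (PySem.List.max? (PySem.Dict.ofList bb).keys (fun x => x)).getD 0 + 1 else 0)]
  rw [B_grid pcs pcs
    (if bb ≠ [] then (PySem.List.max? (PySem.Dict.ofList bb).keys (fun x => x)).getD 0 + 1 else 0)
    _ PySem.Dict.empty [] [] hbd (fun v _ => by simp [PySem.Dict.getD_empty])]
  simp

-- ===== VERDICT (by name: the statement is the Claim_ definition above) =====
theorem subdivide_star_spec : Claim_equal_subdivide_star := by
  intro pcs bb _
  unfold Spec_subdivide_star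
  rw [A_normal, B_normal]
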